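-- pv_equiv track=rewrite | github.com/k-harada/AtCoder | ARC/ARC109/C.py | solve
-- ===== SOURCE A (Python) =====
-- def solve(n, k, s):
--     while k > 0:
--         if len(s) % 2 == 1:
--             s = s + s
--         t = ""
--         for i in range(0, len(s), 2):
--             a = s[i]
--             b = s[i + 1]
--             if a == 'R':
--                 if b == 'P':
--                     t += 'P'
--                 else:
--                     t += 'R'
--             elif a == 'S':
--                 if b == 'R':
--                     t += 'R'
--                 else:
--                     t += 'S'
--             else:
--                 if b == 'S':
--                     t += 'S'
--                 else:
--                     t += 'P'
--         k -= 1
--         s = t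
--     return s[0]
-- ===== SOURCE B (Python) =====
-- def _battle(a, b):
--     if a == 'R':
--         return 'P' if b == 'P' else 'R'
--     if a == 'S':
--         return 'R' if b == 'R' else 'S'
--     return 'S' if b == 'S' else 'P'
--
--
-- def solve(n, k, s):
--     # Binary-lifting over a fixed-size cyclic array: w[i] is the champion of the
--     # 2^l-bracket starting at position i (mod len(s)); stride doubles each level.
--     # Once the stride is 0 mod len(s), one more level reaches a fixed point.
--     m = len(s)
--     w = list(s)
--     step = 1 % m
--     rounds = k if k > 0 else 0
--     for _ in range(rounds):
--         if step == 0: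
--             w = [_battle(x, x) for x in w]
--             break
--         w = [_battle(w[i], w[(i + step) % m]) for i in range(m)]
--         step = step * 2 % m
--     return w[0]
-- ===== Notes on version B (the rewrite author's own statement) =====
-- stated objective: alternative
-- what changed: Replaces A's round-by-round rebuilding of shrinking/doubling tournament strings by a binary-lifting pass over a fixed-size cyclic array: w[i] holds the champion of the 2^l-bracket starting at position i mod len(s), with the pairing stride doubling modulo len(s) each level.
import Mathlib
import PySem

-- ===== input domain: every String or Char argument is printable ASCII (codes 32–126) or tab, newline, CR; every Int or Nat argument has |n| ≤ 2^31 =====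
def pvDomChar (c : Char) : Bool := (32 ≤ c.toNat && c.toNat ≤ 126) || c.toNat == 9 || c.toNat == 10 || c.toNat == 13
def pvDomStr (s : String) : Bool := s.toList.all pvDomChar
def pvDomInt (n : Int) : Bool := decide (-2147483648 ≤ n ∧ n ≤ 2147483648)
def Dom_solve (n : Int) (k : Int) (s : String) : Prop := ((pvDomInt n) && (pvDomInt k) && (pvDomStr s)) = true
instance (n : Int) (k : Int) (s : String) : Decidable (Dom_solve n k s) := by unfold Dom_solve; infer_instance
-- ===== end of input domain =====

-- B replaces A's round-by-round rebuilding of shrinking/doubling strings by a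
-- binary-lifting pass over a fixed-size cyclic array (stride doubling mod len(s));
-- objective: alternative algorithm, equivalence of return values proved on s ≠ "".

-- ===== PORT A =====
-- one halving round of A: double s if its length is odd, then pair adjacent entries
def roundA (t : List Char) : List Char :=
  let s := if t.length % 2 = 1 then t ++ t else t
  (PySem.List.pyRange 0 (s.length : Int) 2).foldl
    (fun acc i =>
      let a := PySem.List.pyGetD s i ' '        -- s[i], index provably in range
      let b := PySem.List.pyGetD s (i + 1) ' '  -- s[i+1], index provably in range (length even)
      acc ++ [if a = 'R' then (if b = 'P' then 'P' else 'R')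
              else if a = 'S' then (if b = 'R' then 'R' else 'S')
              else if b = 'S' then 'S' else 'P']) []

-- 'while k > 0: … ; k -= 1' runs exactly k.toNat times
def solveLoopA : Nat → List Char → List Char
  | 0, t => t
  | f + 1, t => solveLoopA f (roundA t)

def solve (n : Int) (k : Int) (s : String) : String :=
  match solveLoopA k.toNat s.toList with
  | [] => ""            -- unreachable under Pre_solve: Python raises IndexError on s = ""
  | c :: _ => String.ofList [c]   -- s[0] as a 1-char string

-- ===== PORT B =====
def battleB (a b : Char) : Char :=
  if a = 'R' then (if b = 'P' then 'P' else 'R')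
  else if a = 'S' then (if b = 'R' then 'R' else 'S')
  else if b = 'S' then 'S' else 'P'

-- one level of B: w <- [battle(w[i], w[(i+step) % m]) for i in range(m)]
def stepB (m : Nat) (w : List Char) (st : Nat) : List Char :=
  (List.range m).map (fun i => battleB (w.getD i ' ') (w.getD ((i + st) % m) ' '))

-- once the stride is 0 mod m, one more battle level reaches a fixed point ('break')
def loopB (m : Nat) : Nat → List Char → Nat → List Char
  | 0, w, _ => w
  | f + 1, w, st =>
      if st = 0 then w.map (fun x => battleB x x)
      else loopB m f (stepB m w st) (st * 2 % m)

def solve_alt (n : Int) (k : Int) (s : String) : String :=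
  match loopB s.toList.length k.toNat s.toList (1 % s.toList.length) with
  | [] => ""            -- unreachable under Pre_solve (Python B raises ZeroDivisionError on "")
  | c :: _ => String.ofList [c]

-- ===== PRECONDITION & SPEC =====
-- Pre_ excludes only the empty string, on which A raises IndexError (and B ZeroDivisionError).
def Pre_solve (n : Int) (k : Int) (s : String) : Prop := s ≠ ""
instance (n : Int) (k : Int) (s : String) : Decidable (Pre_solve n k s) := by
  unfold Pre_solve; infer_instance
def pvWitness_solve : Int × Int × String := (3, 2, "RPS")

def Spec_solve (n : Int) (k : Int) (s : String) (out : String) : Prop := out = solve_alt n k s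
instance (n : Int) (k : Int) (s : String) (out : String) : Decidable (Spec_solve n k s out) := by
  unfold Spec_solve; infer_instance

-- ===== CLAIM (what is proved, stated in full; the proofs are below) =====
def Claim_equal_solve : Prop :=
  ∀ (n : Int) (k : Int) (s : String), Dom_solve n k s → Pre_solve n k s →
    Spec_solve n k s (solve n k s)

-- ===== LEMMAS AND PROOFS =====

-- the periodic view of a nonempty list
def per (t : List Char) (j : Nat) : Char := t.getD (j % t.length) ' '

-- champion of the bracket of 2^r consecutive contestants starting at j (A's tree, top-down)
def F (t : List Char) : Nat → Nat → Char
  | 0, j => per t j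
  | r + 1, j => battleB (F t r (2 * j)) (F t r (2 * j + 1))

-- B's bracket function: champion of the 2^l-bracket starting at position i
def C (t : List Char) : Nat → Nat → Char
  | 0, i => per t i
  | l + 1, i => battleB (C t l i) (C t l (i + 2 ^ l))

theorem per_congr (t : List Char) {i j : Nat} (h : i % t.length = j % t.length) :
    per t i = per t j := by simp [per, h]

theorem getD_doubling (t : List Char) (i : Nat)
    (hi : i < (if t.length % 2 = 1 then t ++ t else t).length) :
    (if t.length % 2 = 1 then t ++ t else t).getD i ' ' = per t i := by
  by_cases h : t.length % 2 = 1
  · rw [if_pos h] at hi ⊢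
    simp only [List.length_append] at hi
    by_cases hlt : i < t.length
    · rw [per, Nat.mod_eq_of_lt hlt,
        List.getD_eq_getElem _ _ (by simp only [List.length_append]; omega),
        List.getD_eq_getElem t ' ' hlt]
      exact List.getElem_append_left hlt
    · have h1 : i - t.length < t.length := by omega
      have hmod : i % t.length = i - t.length := by
        conv_lhs => rw [show i = (i - t.length) + 1 * t.length by omega]
        rw [Nat.add_mul_mod_self_right, Nat.mod_eq_of_lt h1]
      rw [per, hmod,
        List.getD_eq_getElem _ _ (by simp only [List.length_append]; omega),
        List.getD_eq_getElem t ' ' h1]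
      simp [List.getElem_append, hlt]
  · rw [if_neg h] at hi ⊢
    rw [per, Nat.mod_eq_of_lt hi]

theorem roundA_eq_map (t : List Char) :
    roundA t = (List.range ((if t.length % 2 = 1 then t ++ t else t).length / 2)).map
      (fun j => battleB (per t (2 * j)) (per t (2 * j + 1))) := by
  have hL : (if t.length % 2 = 1 then t ++ t else t).length % 2 = 0 := by
    by_cases h : t.length % 2 = 1 <;> simp [h] <;> omega
  set s := if t.length % 2 = 1 then t ++ t else t with hs
  rw [roundA]
  rw [PySem.List.pyRange_of_pos 0 (s.length : Int) (by norm_num)]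
  rw [List.foldl_map, PySem.List.foldl_append_singleton_eq_map]
  by_cases h0 : s.length = 0
  · simp [h0]
  · have hpos : (0 : Int) < (s.length : Int) := by
      exact_mod_cast Nat.pos_of_ne_zero h0
    rw [if_pos hpos]
    have hcount : (((s.length : Int) - 0 + 2 - 1) / 2).toNat = s.length / 2 := by
      omega
    rw [hcount]
    apply List.map_congr_left
    intro j hj
    simp only [List.mem_range] at hj
    have h2j : 2 * j < s.length := by omega
    have h2j1 : 2 * j + 1 < s.length := by omega
    have e1 : (0 + 2 * (j : Int)) = ((2 * j : Nat) : Int) := by push_cast; ring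
    rw [e1]
    rw [show ((2 * j : Nat) : Int) + 1 = ((2 * j + 1 : Nat) : Int) by push_cast; ring]
    rw [PySem.List.pyGetD_natCast, PySem.List.pyGetD_natCast,
      getD_doubling t _ h2j, getD_doubling t _ h2j1]
    simp [battleB]

theorem roundA_length (t : List Char) :
    (roundA t).length = (if t.length % 2 = 1 then t ++ t else t).length / 2 := by
  rw [roundA_eq_map]; simp

theorem roundA_ne_nil (t : List Char) (ht : t ≠ []) : roundA t ≠ [] := by
  have h := roundA_length t
  intro hc
  rw [hc] at h
  by_cases hp : t.length % 2 = 1 <;> simp [hp] at h <;>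
    · have : 0 < t.length := List.length_pos_iff.mpr ht
      omega

-- one round, seen through the periodic view
theorem per_roundA (t : List Char) (ht : t ≠ []) (j : Nat) :
    per (roundA t) j = battleB (per t (2 * j)) (per t (2 * j + 1)) := by
  have hm : 0 < t.length := List.length_pos_iff.mpr ht
  set L := (if t.length % 2 = 1 then t ++ t else t).length with hLdef
  have hdvd : t.length ∣ L := by
    by_cases h : t.length % 2 = 1 <;> simp [hLdef, h]
  have hLeven : L % 2 = 0 := by
    by_cases h : t.length % 2 = 1 <;> simp [hLdef, h] <;> omega
  have hLpos : 0 < L := by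
    by_cases h : t.length % 2 = 1 <;> simp [hLdef, h] <;> omega
  have hH : 0 < L / 2 := by omega
  rw [per, roundA_length, roundA_eq_map]
  rw [List.getD_eq_getElem _ _ (by simpa using Nat.mod_lt _ hH)]
  rw [List.getElem_map, List.getElem_range]
  have key : ∀ c : Nat, per t (2 * (j % (L / 2)) + c) = per t (2 * j + c) := by
    intro c
    apply per_congr
    obtain ⟨d, hd⟩ := hdvd
    have hjeq : L / 2 * (j / (L / 2)) + j % (L / 2) = j := Nat.div_add_mod j (L / 2)
    have e : 2 * (L / 2 * (j / (L / 2))) = t.length * (d * (j / (L / 2))) := by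
      rw [← Nat.mul_assoc, show 2 * (L / 2) = L by omega, hd, Nat.mul_assoc]
    have hj : 2 * j + c = (2 * (j % (L / 2)) + c) + t.length * (d * (j / (L / 2))) := by
      omega
    rw [hj, Nat.add_mul_mod_self_left]
  have k0 := key 0
  have k1 := key 1
  simp only [Nat.add_zero] at k0
  rw [k0, k1]

-- the tournament tree commutes with one round of A
theorem F_roundA (t : List Char) (ht : t ≠ []) (r : Nat) (j : Nat) :
    F (roundA t) r j = F t (r + 1) j := by
  induction r generalizing j with
  | zero => simpa [F] using per_roundA t ht j
  | succ r ih => simp only [F] at *; rw [ih, ih]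

-- A's simulation computes F
theorem solveLoopA_per (r : Nat) (t : List Char) (ht : t ≠ []) (j : Nat) :
    per (solveLoopA r t) j = F t r j := by
  induction r generalizing t with
  | zero => simp [solveLoopA, F]
  | succ r ih =>
      rw [solveLoopA, ih (roundA t) (roundA_ne_nil t ht), F_roundA t ht]

theorem solveLoopA_ne_nil (r : Nat) (t : List Char) (ht : t ≠ []) :
    solveLoopA r t ≠ [] := by
  induction r generalizing t with
  | zero => simpa [solveLoopA]
  | succ r ih => exact ih (roundA t) (roundA_ne_nil t ht)

-- F at the root equals C (B's bracket recursion) at position 0 scaled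
theorem F_eq_C (t : List Char) (r : Nat) (j : Nat) : F t r j = C t r (j * 2 ^ r) := by
  induction r generalizing j with
  | zero => simp [F, C]
  | succ r ih =>
      simp only [F, C, ih]
      have e1 : 2 * j * 2 ^ r = j * 2 ^ (r + 1) := by ring
      have e2 : (2 * j + 1) * 2 ^ r = j * 2 ^ (r + 1) + 2 ^ r := by ring
      rw [e1, e2]

-- C is periodic modulo the length
theorem C_congr (t : List Char) (l : Nat) {i j : Nat}
    (h : i % t.length = j % t.length) : C t l i = C t l j := by
  induction l generalizing i j with
  | zero => simpa [C] using per_congr t h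
  | succ l ih =>
      simp only [C]
      rw [ih h, ih (Nat.ModEq.add_right (2 ^ l) h)]

theorem getD_map_range' (m i : Nat) (f : Nat → Char) (hi : i < m) :
    ((List.range m).map f).getD i ' ' = f i := by
  rw [List.getD_eq_getElem _ _ (by simpa using hi)]
  simp

theorem battleB_rps (a b : Char) :
    battleB a b = 'R' ∨ battleB a b = 'P' ∨ battleB a b = 'S' := by
  unfold battleB; split_ifs <;> simp

theorem battleB_self (c : Char) (h : c = 'R' ∨ c = 'P' ∨ c = 'S') :
    battleB c c = c := by
  rcases h with h | h | h <;> simp [battleB, h]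

-- after the stride reaches 0 mod the length, one more level is a fixed point
theorem C_stab (t : List Char) (l : Nat) (hl : 2 ^ l % t.length = 0) (r : Nat) (hr : 1 ≤ r)
    (i : Nat) : C t (l + r) i = C t (l + 1) i := by
  induction r with
  | zero => omega
  | succ r ih =>
      rcases Nat.lt_or_ge r 1 with h1 | h1
      · interval_cases r
        rfl
      · rw [show l + (r + 1) = (l + r) + 1 by omega]
        have hdvd : t.length ∣ 2 ^ (l + r) :=
          dvd_trans (Nat.dvd_iff_mod_eq_zero.mpr hl) (pow_dvd_pow 2 (Nat.le_add_right l r))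
        have hcong : (i + 2 ^ (l + r)) % t.length = i % t.length := by
          obtain ⟨c, hc⟩ := hdvd
          rw [hc, Nat.add_mul_mod_self_left]
        simp only [C]
        rw [C_congr t (l + r) hcong]
        rw [ih h1]
        have hC : C t (l + 1) i = battleB (C t l i) (C t l (i + 2 ^ l)) := rfl
        rw [hC, battleB_self _ (battleB_rps _ _)]

-- B's loop invariant: after reaching level l (stride 2^l mod m), the array is C t l
theorem loopB_inv (t : List Char) (ht : t ≠ []) (r : Nat) :
    ∀ l : Nat, loopB t.length r ((List.range t.length).map (fun i => C t l i)) (2 ^ l % t.length)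
      = (List.range t.length).map (fun i => C t (l + r) i) := by
  have hm : 0 < t.length := List.length_pos_iff.mpr ht
  induction r with
  | zero => intro l; simp [loopB]
  | succ r ih =>
      intro l
      rw [loopB]
      by_cases hz : 2 ^ l % t.length = 0
      · rw [if_pos hz, List.map_map]
        apply List.map_congr_left
        intro i hi
        have h1 : C t (l + (r + 1)) i = C t (l + 1) i := C_stab t l hz (r + 1) (by omega) i
        rw [h1]
        have hcong : (i + 2 ^ l) % t.length = i % t.length := by
          obtain ⟨c, hc⟩ := Nat.dvd_iff_mod_eq_zero.mpr hz
          rw [hc, Nat.add_mul_mod_self_left]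
        show battleB (C t l i) (C t l i) = C t (l + 1) i
        rw [show C t (l + 1) i = battleB (C t l i) (C t l (i + 2 ^ l)) from rfl,
          C_congr t l hcong]
      rw [if_neg hz]
      have hstep : stepB t.length ((List.range t.length).map (fun i => C t l i)) (2 ^ l % t.length)
          = (List.range t.length).map (fun i => C t (l + 1) i) := by
        unfold stepB
        apply List.map_congr_left
        intro i hi
        simp only [List.mem_range] at hi
        rw [getD_map_range' _ _ _ hi,
          getD_map_range' _ _ _ (Nat.mod_lt _ hm)]
        have hmod : ((i + 2 ^ l % t.length) % t.length) % t.length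
            = (i + 2 ^ l) % t.length :=
          (Nat.mod_modEq _ t.length).trans (Nat.ModEq.add_left i (Nat.mod_modEq _ t.length))
        rw [C_congr t l hmod]
        simp [C]
      have hst : 2 ^ l % t.length * 2 % t.length = 2 ^ (l + 1) % t.length := by
        have : 2 ^ l % t.length * 2 ≡ 2 ^ l * 2 [MOD t.length] :=
          (Nat.mod_modEq _ t.length).mul_right 2
        rw [pow_succ]
        exact this
      rw [hstep, hst, ih (l + 1)]
      congr 1
      funext i
      congr 1
      omega

-- ===== VERDICT (by name: the statement is the Claim_ definition above) =====
theorem solve_spec : Claim_equal_solve := by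
  intro n k s _ hpre
  unfold Spec_solve solve solve_alt
  have ht : s.toList ≠ [] := fun hc => hpre (String.toList_inj.mp (by simp [hc]))
  have hm : 0 < s.toList.length := List.length_pos_iff.mpr ht
  set t := s.toList with htdef
  -- A side
  obtain ⟨c, rest, hcr⟩ := List.exists_cons_of_ne_nil (solveLoopA_ne_nil k.toNat t ht)
  have hc : c = C t k.toNat 0 := by
    have hper := solveLoopA_per k.toNat t ht 0
    rw [hcr] at hper
    simpa [per, F_eq_C] using hper
  -- B side
  have hB : loopB t.length k.toNat t (1 % t.length)
      = (List.range t.length).map (fun i => C t k.toNat i) := by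
    have h0 : t = (List.range t.length).map (fun i => C t 0 i) := by
      apply List.ext_getElem (by simp)
      intro i h1 h2
      simp only [List.getElem_map, List.getElem_range, C, per]
      rw [Nat.mod_eq_of_lt h1, List.getD_eq_getElem t ' ' h1]
    have h1 := loopB_inv t ht k.toNat 0
    rw [← h0] at h1
    simp only [pow_zero, Nat.zero_add] at h1
    exact h1
  rw [hcr, hB]
  obtain ⟨d, rest2, hd2⟩ := List.exists_cons_of_ne_nil
    (show (List.range t.length).map (fun i => C t k.toNat i) ≠ [] by
      simp [List.map_eq_nil_iff, List.range_eq_nil]; omega)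
  have hd : d = C t k.toNat 0 := by
    have := getD_map_range' t.length 0 (fun i => C t k.toNat i) hm
    rw [hd2] at this
    simpa using this
  rw [hd2]
  simp [hc, hd]
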